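-- pv_equiv track=rewrite | github.com/GiribaldiTTV/Nexus-Desktop-AI | dev/orin_boot_transition_verification.py | marker_line_indexes
-- ===== SOURCE A (Python) =====
-- def marker_line_indexes(runtime_lines, markers):
--     indexes = {}
--     for marker in markers:
--         indexes[marker] = -1
--         for index, line in enumerate(runtime_lines):
--             if marker in line:
--                 indexes[marker] = index
--                 break
--     return indexes
-- ===== SOURCE B (Python) =====
-- def marker_line_indexes(runtime_lines, markers):
--     indexes = dict.fromkeys(markers, -1)
--     remaining = list(indexes)
--     for idx, line in enumerate(runtime_lines):
--         if not remaining: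
--             break
--         still = []
--         for m in remaining:
--             if m in line:
--                 indexes[m] = idx
--             else:
--                 still.append(m)
--         remaining = still
--     return indexes
-- ===== Notes on version B (the rewrite author's own statement) =====
-- stated objective: alternative
-- what changed: A scans all lines separately for each marker; B makes a single pass over the lines maintaining the set of markers not yet located and stops as soon as all are found.
import Mathlib
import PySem

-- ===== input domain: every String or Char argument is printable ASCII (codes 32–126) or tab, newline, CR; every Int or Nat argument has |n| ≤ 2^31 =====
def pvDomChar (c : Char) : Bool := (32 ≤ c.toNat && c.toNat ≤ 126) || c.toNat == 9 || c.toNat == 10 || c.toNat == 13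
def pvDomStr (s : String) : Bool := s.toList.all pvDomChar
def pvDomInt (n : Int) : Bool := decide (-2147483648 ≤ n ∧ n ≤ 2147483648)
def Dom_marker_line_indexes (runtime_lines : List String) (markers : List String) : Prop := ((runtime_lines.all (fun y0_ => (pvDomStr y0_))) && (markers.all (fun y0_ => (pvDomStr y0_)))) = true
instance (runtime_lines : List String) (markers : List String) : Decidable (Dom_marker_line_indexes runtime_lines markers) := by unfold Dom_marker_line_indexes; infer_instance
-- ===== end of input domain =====

-- One-line summary: B replaces A's per-marker scan of all lines by a single pass over the
-- lines that maintains the list of markers still unlocated and breaks once all are found.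

-- ===== PORT A =====
-- inner 'for index, line in enumerate(runtime_lines): … break'
def pvAScan (marker : String) (xs : List (Int × String)) (indexes : PySem.Dict String Int) : PySem.Dict String Int :=
  match xs with
  | [] => indexes
  | (index, line) :: rest =>
    if PySem.Str.isIn marker line then indexes.insert marker index
    else pvAScan marker rest indexes

def marker_line_indexes (runtime_lines : List String) (markers : List String) : List (String × Int) :=
  (markers.foldl
    (fun (indexes : PySem.Dict String Int) marker =>
      pvAScan marker (PySem.List.enumerate runtime_lines) (indexes.insert marker (-1)))
    PySem.Dict.empty).items

-- ===== PORT B =====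
-- inner 'for m in remaining: …' accumulating (indexes, still)
def pvBLine (line : String) (idx : Int) (remaining : List String)
    (st : PySem.Dict String Int × List String) : PySem.Dict String Int × List String :=
  remaining.foldl
    (fun st m => if PySem.Str.isIn m line then (st.1.insert m idx, st.2) else (st.1, st.2 ++ [m]))
    st

-- outer 'for idx, line in enumerate(runtime_lines): if not remaining: break …'
def pvBLoop (xs : List (Int × String)) (remaining : List String)
    (indexes : PySem.Dict String Int) : PySem.Dict String Int :=
  match xs with
  | [] => indexes
  | (idx, line) :: rest =>
    if remaining.isEmpty then indexes
    else
      let st := pvBLine line idx remaining (indexes, [])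
      pvBLoop rest st.2 st.1

def marker_line_indexes_alt (runtime_lines : List String) (markers : List String) : List (String × Int) :=
  let indexes := markers.foldl (fun (d : PySem.Dict String Int) m => d.insert m (-1)) PySem.Dict.empty
  (pvBLoop (PySem.List.enumerate runtime_lines) indexes.keys indexes).items

-- ===== PRECONDITION & SPEC =====
def Spec_marker_line_indexes (runtime_lines : List String) (markers : List String) (out : List (String × Int)) : Prop := out = marker_line_indexes_alt runtime_lines markers
instance (runtime_lines : List String) (markers : List String) (out : List (String × Int)) : Decidable (Spec_marker_line_indexes runtime_lines markers out) := by unfold Spec_marker_line_indexes; infer_instance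

-- ===== CLAIM (what is proved, stated in full; the proofs are below) =====
def Claim_equal_marker_line_indexes : Prop := ∀ (runtime_lines : List String) (markers : List String), Dom_marker_line_indexes runtime_lines markers → Spec_marker_line_indexes runtime_lines markers (marker_line_indexes runtime_lines markers)

-- ===== LEMMAS AND PROOFS =====

-- first index (in an (index, line) list) of a line containing m; none if absent
def pvFind? (xs : List (Int × String)) (m : String) : Option Int :=
  (xs.find? (fun p => PySem.Str.isIn m p.2)).map (·.1)

-- a dict whose items are s, each key paired with g of it
def pvMk (s : List String) (g : String → Int) : PySem.Dict String Int :=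
  PySem.Dict.mk (s.map (fun m => (m, g m)))

lemma pvMk_keys (s : List String) (g : String → Int) : (pvMk s g).keys = s := by
  simp [pvMk, PySem.Dict.keys, Function.comp_def]

lemma pvMk_contains_false (s : List String) (g : String → Int) (m : String) (hm : m ∉ s) :
    (pvMk s g).contains m = false := by
  rw [Bool.eq_false_iff]
  intro hc
  rw [PySem.Dict.contains_iff_mem_keys, pvMk_keys] at hc
  exact hm hc

lemma pvMk_insert (s : List String) (g : String → Int) (m : String) (v : Int) (hm : m ∈ s) :
    (pvMk s g).insert m v = pvMk s (fun k => if k = m then v else g k) := by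
  apply PySem.Dict.ext
  rw [PySem.Dict.items_insert_of_contains]
  · simp only [pvMk, List.map_map]
    apply List.map_congr_left
    intro k _
    by_cases h : k = m <;> simp [h]
  · rw [PySem.Dict.contains_iff_mem_keys, pvMk_keys]; exact hm

lemma pvMk_insert_fresh (s : List String) (g : String → Int) (m : String) (v : Int) (hm : m ∉ s) :
    (pvMk s g).insert m v = pvMk (s ++ [m]) (fun k => if k = m then v else g k) := by
  apply PySem.Dict.ext
  rw [PySem.Dict.items_insert_of_not_contains _ _ (pvMk_contains_false s g m hm)]
  simp only [pvMk, List.map_append, List.map_cons, List.map_nil]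
  congr 1
  apply List.map_congr_left
  intro k hk
  have hne : k ≠ m := fun h => hm (h ▸ hk)
  simp [hne]

lemma pvAScan_insert (m : String) (xs : List (Int × String)) (d : PySem.Dict String Int) :
    pvAScan m xs (d.insert m (-1)) = d.insert m ((pvFind? xs m).getD (-1)) := by
  induction xs with
  | nil => simp [pvAScan, pvFind?]
  | cons p rest ih =>
    obtain ⟨i, l⟩ := p
    simp only [pvAScan]
    by_cases h : PySem.Str.isIn m l = true
    · rw [if_pos h, PySem.Dict.insert_insert_self]
      simp only [pvFind?]
      rw [List.find?_cons_of_pos (by simpa using h)]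
      rfl
    · have h' : PySem.Chars.isIn m.toList l.toList = false := by simpa using h
      rw [if_neg (by simp [h']), ih]
      simp only [pvFind?]
      rw [List.find?_cons_of_neg (by simp [h'])]

-- A's fold over markers, starting from pvMk s f, yields pvMk over the updated key list
lemma pvA_fold (runtime_lines : List String) (markers : List String) (s : List String) (f : String → Int) :
    markers.foldl
      (fun (indexes : PySem.Dict String Int) marker =>
        pvAScan marker (PySem.List.enumerate runtime_lines) (indexes.insert marker (-1)))
      (pvMk s f)
    = pvMk (PySem.Set.update s markers)
        (fun m => if m ∈ markers then (pvFind? (PySem.List.enumerate runtime_lines) m).getD (-1) else f m) := by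
  induction markers generalizing s f with
  | nil =>
    simp [PySem.Set.update]
  | cons m ms ih =>
    rw [List.foldl_cons, pvAScan_insert]
    have hadd : (pvMk s f).insert m ((pvFind? (PySem.List.enumerate runtime_lines) m).getD (-1))
        = pvMk (PySem.Set.add s m)
            (fun k => if k = m then (pvFind? (PySem.List.enumerate runtime_lines) m).getD (-1) else f k) := by
      by_cases hm : m ∈ s
      · rw [pvMk_insert s f m _ hm]
        have : PySem.Set.add s m = s := by
          simp [PySem.Set.add, hm]
        rw [this]
      · rw [pvMk_insert_fresh s f m _ hm]
        have : PySem.Set.add s m = s ++ [m] := by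
          simp [PySem.Set.add, hm]
        rw [this]
    rw [hadd, ih, PySem.Set.update_cons]
    congr 1
    funext k
    by_cases hk : k = m <;> by_cases hks : k ∈ ms <;> simp [hk, hks]

-- B inner loop: updates every still-remaining marker found in this line, collects the others
lemma pvBLine_spec (line : String) (idx : Int) (rem : List String) (s : List String)
    (g : String → Int) (acc : List String) (hsub : ∀ m ∈ rem, m ∈ s) :
    pvBLine line idx rem (pvMk s g, acc)
    = (pvMk s (fun m => if m ∈ rem ∧ PySem.Str.isIn m line = true then idx else g m),
       acc ++ rem.filter (fun m => !PySem.Str.isIn m line)) := by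
  induction rem generalizing g acc with
  | nil =>
    have hg : (fun m => if m ∈ ([] : List String) ∧ PySem.Str.isIn m line = true then idx else g m) = g := by
      funext k; simp
    simp only [pvBLine, List.foldl_nil, List.filter_nil, List.append_nil, hg]
  | cons m ms ih =>
    have hms : ∀ k ∈ ms, k ∈ s := fun k hk => hsub k (.tail _ hk)
    by_cases h : PySem.Str.isIn m line = true
    · have h' : PySem.Chars.isIn m.toList line.toList = true := by simpa using h
      have hstep : pvBLine line idx (m :: ms) (pvMk s g, acc)
          = pvBLine line idx ms ((pvMk s g).insert m idx, acc) := by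
        simp only [pvBLine, List.foldl_cons, if_pos h]
      rw [hstep, pvMk_insert s g m idx (hsub m (.head _)), ih _ acc hms]
      have h1 : (fun k => if k ∈ ms ∧ PySem.Str.isIn k line = true then idx else if k = m then idx else g k)
          = (fun k => if k ∈ m :: ms ∧ PySem.Str.isIn k line = true then idx else g k) := by
        funext k
        by_cases hk : k = m <;> by_cases hks : k ∈ ms <;> simp [hk, hks, h']
      have h2 : List.filter (fun k => !PySem.Str.isIn k line) (m :: ms)
          = List.filter (fun k => !PySem.Str.isIn k line) ms := by
        simp [h']
      rw [h1, h2]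
    · have h' : PySem.Chars.isIn m.toList line.toList = false := by simpa using h
      have hstep : pvBLine line idx (m :: ms) (pvMk s g, acc)
          = pvBLine line idx ms (pvMk s g, acc ++ [m]) := by
        simp [pvBLine, List.foldl_cons, h']
      rw [hstep, ih _ (acc ++ [m]) hms]
      have h1 : (fun k => if k ∈ ms ∧ PySem.Str.isIn k line = true then idx else g k)
          = (fun k => if k ∈ m :: ms ∧ PySem.Str.isIn k line = true then idx else g k) := by
        funext k
        by_cases hk : k = m <;> by_cases hks : k ∈ ms <;> simp [hk, hks, h']
      have h2 : List.filter (fun k => !PySem.Str.isIn k line) (m :: ms)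
          = m :: List.filter (fun k => !PySem.Str.isIn k line) ms := by
        simp [h']
      rw [h1, h2, List.append_assoc]
      rfl

-- B outer loop invariant
lemma pvBLoop_spec (xs : List (Int × String)) (rem : List String) (s : List String)
    (g : String → Int) (hsub : ∀ m ∈ rem, m ∈ s) :
    pvBLoop xs rem (pvMk s g)
    = pvMk s (fun m => if m ∈ rem then (pvFind? xs m).getD (g m) else g m) := by
  induction xs generalizing rem g with
  | nil =>
    have hg : (fun m => if m ∈ rem then (pvFind? ([] : List (Int × String)) m).getD (g m) else g m) = g := by
      funext m
      by_cases h : m ∈ rem <;> simp [h, pvFind?]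
    simp only [pvBLoop, hg]
  | cons p rest ih =>
    obtain ⟨i, l⟩ := p
    by_cases hrem : rem = []
    · subst hrem
      have hg : (fun m => if m ∈ ([] : List String) then (pvFind? ((i, l) :: rest) m).getD (g m) else g m) = g := by
        funext m; simp
      simp only [pvBLoop, List.isEmpty_nil, if_true, hg]
    · rw [pvBLoop]
      rw [if_neg (by simpa [List.isEmpty_iff] using hrem)]
      rw [pvBLine_spec l i rem s g [] hsub]
      simp only [List.nil_append]
      rw [ih (rem.filter (fun m => !PySem.Str.isIn m l)) _
        (fun m hm => hsub m (List.mem_of_mem_filter hm))]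
      congr 1
      funext m
      by_cases hm : m ∈ rem
      · by_cases hl : PySem.Str.isIn m l = true
        · have hl' : PySem.Chars.isIn m.toList l.toList = true := by simpa using hl
          have hnf : m ∉ rem.filter (fun k => !PySem.Str.isIn k l) := by
            simp [List.mem_filter, hl']
          rw [if_neg hnf, if_pos ⟨hm, hl⟩, if_pos hm]
          simp only [pvFind?]
          rw [List.find?_cons_of_pos (by simpa using hl)]
          rfl
        · have hl' : PySem.Chars.isIn m.toList l.toList = false := by simpa using hl
          have hf : m ∈ rem.filter (fun k => !PySem.Str.isIn k l) := by
            simp [List.mem_filter, hm, hl']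
          rw [if_pos hf, if_pos hm]
          have hng : ¬ (m ∈ rem ∧ PySem.Str.isIn m l = true) := fun hc => hl hc.2
          rw [if_neg hng]
          simp only [pvFind?]
          rw [List.find?_cons_of_neg (by simp [hl'])]
      · have hnf : m ∉ rem.filter (fun k => !PySem.Str.isIn k l) :=
          fun h => hm (List.mem_of_mem_filter h)
        have hng : ¬ (m ∈ rem ∧ PySem.Str.isIn m l = true) := fun hc => hm hc.1
        rw [if_neg hnf, if_neg hng, if_neg hm]

-- the initial dict of B is pvMk over the deduplicated markers
lemma pvB_init (markers : List String) :
    markers.foldl (fun (d : PySem.Dict String Int) m => d.insert m (-1)) PySem.Dict.empty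
    = pvMk (PySem.List.dedup markers) (fun _ => -1) := by
  have h : markers.foldl
      (fun (d : PySem.Dict String Int) m =>
        pvAScan m (PySem.List.enumerate ([] : List String)) (d.insert m (-1)))
      (pvMk [] (fun _ => -1))
      = pvMk (PySem.Set.update [] markers)
          (fun m => if m ∈ markers then (pvFind? (PySem.List.enumerate ([] : List String)) m).getD (-1) else -1) :=
    pvA_fold [] markers [] (fun _ => -1)
  have h2 : markers.foldl (fun (d : PySem.Dict String Int) m => d.insert m (-1)) PySem.Dict.empty
      = markers.foldl
          (fun (d : PySem.Dict String Int) m =>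
            pvAScan m (PySem.List.enumerate ([] : List String)) (d.insert m (-1)))
          (pvMk [] (fun _ => -1)) := rfl
  rw [h2, h, PySem.Set.update_nil_left]
  simp only [PySem.List.dedup_eq_ofList]
  congr 1
  funext m
  by_cases hm : m ∈ markers <;> simp [hm, pvFind?, PySem.List.enumerate]

lemma pvAlt_eq (runtime_lines markers : List String) :
    marker_line_indexes_alt runtime_lines markers
    = (pvBLoop (PySem.List.enumerate runtime_lines)
        (markers.foldl (fun (d : PySem.Dict String Int) m => d.insert m (-1)) PySem.Dict.empty).keys
        (markers.foldl (fun (d : PySem.Dict String Int) m => d.insert m (-1)) PySem.Dict.empty)).items := rfl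

-- ===== VERDICT (by name: the statement is the Claim_ definition above) =====
theorem marker_line_indexes_spec : Claim_equal_marker_line_indexes := by
  intro runtime_lines markers _
  unfold Spec_marker_line_indexes marker_line_indexes
  rw [pvAlt_eq, pvB_init, pvMk_keys]
  rw [pvBLoop_spec _ _ _ _ (fun m hm => hm)]
  have hempty : (PySem.Dict.empty : PySem.Dict String Int) = pvMk [] (fun _ => -1) := rfl
  rw [hempty, pvA_fold runtime_lines markers [] (fun _ => -1), PySem.Set.update_nil_left]
  simp only [PySem.List.dedup_eq_ofList]
  congr 2
  funext m
  by_cases hm : m ∈ markers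
  · simp [hm, PySem.Set.mem_ofList]
  · have : m ∉ PySem.Set.ofList markers := fun h => hm ((PySem.Set.mem_ofList markers m).mp h)
    simp [hm, this]
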